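-- pv_equiv track=rewrite | github.com/ZiweiLiu0908/ECP | Approximation_simulation/csv_generator/LUT_appro3.py | twos_complement_to_sign_magnitude
-- ===== SOURCE A (Python) =====
-- def twos_complement_to_sign_magnitude(binary):
--     """
--     Converts a two's complement binary list to its decimal magnitude.
--     If the sign bit is 0, the number is non-negative.
--     If the sign bit is 1, interpret the number as negative.
--     :param binary: list of bits
--     :return: integer value
--     """
--     sign = binary[0]
--     if sign == 0:
--         # Non-negative number, directly convert to decimal
--         return int(''.join(map(str, binary)), 2)
--     else:
--         # Negative number, find the magnitude by inverting and adding 1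
--         inverted = [1 - bit for bit in binary]
--         incremented = int(''.join(map(str, inverted)), 2) + 1
--         twos_complement_value = incremented & ((1 << len(binary)) - 1)
--         return twos_complement_value
-- ===== SOURCE B (Python) =====
-- def twos_complement_to_sign_magnitude(binary):
--     """
--     Converts a two's complement binary list to its decimal magnitude.
--     Parses the bit string once; for a negative number (sign bit 1) the
--     magnitude is 2**n - unsigned_value, so no inversion/+1/mask is needed.
--     """
--     unsigned = int(''.join(map(str, binary)), 2)
--     if binary[0] == 0:
--         return unsigned
--     return (1 << len(binary)) - unsigned
-- ===== Notes on version B (the rewrite author's own statement) =====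
-- stated objective: simpler
-- what changed: B parses the joined bit string once and returns the unsigned value, or 2**len(binary) minus it when the sign bit is set, replacing A's invert-every-bit comprehension, second join/parse, +1 and mask with a single subtraction.
-- outside the precondition, e.g. on twos_complement_to_sign_magnitude([0, 10]): A returns 2, B returns 2; on twos_complement_to_sign_magnitude([2, 0]): A returns 2, B raises ValueError
import Mathlib
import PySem

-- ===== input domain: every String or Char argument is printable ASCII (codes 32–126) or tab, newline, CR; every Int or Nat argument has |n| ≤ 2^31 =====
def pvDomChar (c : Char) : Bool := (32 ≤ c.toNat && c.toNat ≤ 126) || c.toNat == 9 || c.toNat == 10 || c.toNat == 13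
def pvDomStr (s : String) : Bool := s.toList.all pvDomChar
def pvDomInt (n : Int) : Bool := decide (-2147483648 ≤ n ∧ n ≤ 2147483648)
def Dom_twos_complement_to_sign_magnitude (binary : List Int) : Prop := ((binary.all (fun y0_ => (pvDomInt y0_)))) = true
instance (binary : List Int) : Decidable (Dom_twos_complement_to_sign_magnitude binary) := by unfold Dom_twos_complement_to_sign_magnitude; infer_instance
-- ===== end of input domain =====

-- B replaces A's invert-every-bit comprehension, second parse, +1 and mask by the single
-- identity magnitude = 2^n - unsigned_value (objective: simpler; same O(n) cost).

-- Shared helper of both ports: Python's int(s, 2) over the characters of s, ported by hand.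
-- Exact on every string these ports build under Pre_ (a nonempty run of '0'/'1' characters;
-- whitespace, signs, '0b' prefixes and underscores cannot occur in such a string, so the
-- corresponding branches of CPython's parser are unreachable and are not reproduced).
def pyIntBase2Go? : List Char → Int → Option Int
  | [], acc => some acc
  | c :: rest, acc =>
      if c = '0' then pyIntBase2Go? rest (2 * acc)
      else if c = '1' then pyIntBase2Go? rest (2 * acc + 1)
      else none

-- int(s, 2): the empty string is a ValueError (none).
def pyIntBase2? (cs : List Char) : Option Int :=
  match cs with
  | [] => none
  | _ => pyIntBase2Go? cs 0

-- ''.join(map(str, bits)) as characters: concatenation of str(bit) for each bit.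
def joinBits (bits : List Int) : List Char := (bits.map PySem.Int.toChars).flatten

-- ===== PORT A =====
def twos_complement_to_sign_magnitude (binary : List Int) : Int :=
  let sign := PySem.List.pyGetD binary 0 0   -- binary[0]; in range under Pre_
  if sign = 0 then
    (pyIntBase2? (joinBits binary)).getD 0   -- int(''.join(map(str, binary)), 2); some under Pre_
  else
    let inverted := binary.map (fun bit => 1 - bit)
    let incremented := (pyIntBase2? (joinBits inverted)).getD 0 + 1
    let twos_complement_value := PySem.Int.band incremented (((1 : Int) <<< binary.length) - 1)
    twos_complement_value

-- ===== PORT B =====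
def twos_complement_to_sign_magnitude_alt (binary : List Int) : Int :=
  let unsigned := (pyIntBase2? (joinBits binary)).getD 0
  if PySem.List.pyGetD binary 0 0 = 0 then unsigned
  else ((1 : Int) <<< binary.length) - unsigned

-- ===== PRECONDITION & SPEC =====
-- Pre_ excludes the empty list (A raises IndexError) and any entry outside {0, 1}: on most
-- such lists A raises ValueError, but on some (decimal digits of entries all 0/1, e.g.
-- [0, 10], or a leading '-' absorbed by int(), e.g. [2, 0]) A still returns a value that is
-- an accident of concatenating decimal representations, not a two's-complement reading.
def Pre_twos_complement_to_sign_magnitude (binary : List Int) : Prop :=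
  binary ≠ [] ∧ ∀ b ∈ binary, b = 0 ∨ b = 1
instance (binary : List Int) : Decidable (Pre_twos_complement_to_sign_magnitude binary) := by
  unfold Pre_twos_complement_to_sign_magnitude; infer_instance

def pvWitness_twos_complement_to_sign_magnitude : List Int := [1, 0, 1]

def Spec_twos_complement_to_sign_magnitude (binary : List Int) (out : Int) : Prop := out = twos_complement_to_sign_magnitude_alt binary
instance (binary : List Int) (out : Int) : Decidable (Spec_twos_complement_to_sign_magnitude binary out) := by unfold Spec_twos_complement_to_sign_magnitude; infer_instance

-- ===== CLAIM (what is proved, stated in full; the proofs are below) =====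
def Claim_equal_twos_complement_to_sign_magnitude : Prop := ∀ (binary : List Int), Dom_twos_complement_to_sign_magnitude binary → Pre_twos_complement_to_sign_magnitude binary → Spec_twos_complement_to_sign_magnitude binary (twos_complement_to_sign_magnitude binary)

-- ===== LEMMAS AND PROOFS =====

-- value of the parser on a joined 0/1 bit list, with accumulator
theorem pyIntBase2Go?_joinBits (bits : List Int) (a : Int)
    (h : ∀ b ∈ bits, b = 0 ∨ b = 1) :
    pyIntBase2Go? (joinBits bits) a = some (bits.foldl (fun x b => 2 * x + b) a) := by
  induction bits generalizing a with
  | nil => simp [joinBits, pyIntBase2Go?]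
  | cons b rest ih =>
      rcases h b (by simp) with hb | hb <;> subst hb <;>
        simp [joinBits, PySem.Int.toChars, pyIntBase2Go?, List.foldl] at * <;>
        exact ih _ (fun x hx => h x (by simp [hx]))

theorem pyIntBase2?_joinBits (bits : List Int)
    (hne : bits ≠ []) (h : ∀ b ∈ bits, b = 0 ∨ b = 1) :
    pyIntBase2? (joinBits bits) = some (bits.foldl (fun x b => 2 * x + b) 0) := by
  cases bits with
  | nil => exact absurd rfl hne
  | cons b rest =>
      have hcons : joinBits (b :: rest) = PySem.Int.toChars b ++ joinBits rest := by
        simp [joinBits]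
      rcases h b (by simp) with hb | hb <;> subst hb <;>
        rw [show pyIntBase2? (joinBits _) = pyIntBase2Go? (joinBits _) 0 from by
              rw [hcons]; rfl] <;>
        exact pyIntBase2Go?_joinBits _ 0 h

-- value of a bit list plus value of its bitwise complement
theorem foldl_add_inv (bits : List Int) (a c : Int) :
    bits.foldl (fun x b => 2 * x + b) a
      + (bits.map (fun bit => 1 - bit)).foldl (fun x b => 2 * x + b) c
      = (a + c) * 2 ^ bits.length + 2 ^ bits.length - 1 := by
  induction bits generalizing a c with
  | nil => simp
  | cons b rest ih =>
      simp only [List.map_cons, List.foldl_cons, List.length_cons]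
      rw [ih (2 * a + b) (2 * c + (1 - b))]
      ring

theorem foldl_bits_lower (bits : List Int) (a : Int)
    (h : ∀ b ∈ bits, b = 0 ∨ b = 1) (ha : 0 ≤ a) :
    a ≤ bits.foldl (fun x b => 2 * x + b) a := by
  induction bits generalizing a with
  | nil => simp
  | cons b rest ih =>
      simp only [List.foldl_cons]
      have hb : b = 0 ∨ b = 1 := h b (by simp)
      have h1 : a ≤ 2 * a + b := by rcases hb with hb | hb <;> subst hb <;> omega
      have h2 : (0 : Int) ≤ 2 * a + b := by rcases hb with hb | hb <;> subst hb <;> omega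
      exact le_trans h1 (ih (2 * a + b) (fun x hx => h x (List.mem_cons_of_mem _ hx)) h2)

theorem foldl_bits_upper (bits : List Int) (a : Int)
    (h : ∀ b ∈ bits, b = 0 ∨ b = 1) :
    bits.foldl (fun x b => 2 * x + b) a ≤ (a + 1) * 2 ^ bits.length - 1 := by
  induction bits generalizing a with
  | nil => simp
  | cons b rest ih =>
      simp only [List.foldl_cons, List.length_cons]
      have hb : b = 0 ∨ b = 1 := h b (by simp)
      have := ih (2 * a + b) (fun x hx => h x (List.mem_cons_of_mem _ hx))
      have hpow : (0 : Int) < 2 ^ rest.length := by positivity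
      calc rest.foldl (fun x b => 2 * x + b) (2 * a + b)
          ≤ (2 * a + b + 1) * 2 ^ rest.length - 1 := this
        _ ≤ (a + 1) * 2 ^ (rest.length + 1) - 1 := by
            have hble : b ≤ 1 := by rcases hb with hb | hb <;> omega
            rw [pow_succ]
            nlinarith

-- 1 <<< n on Int is 2 ^ n
theorem int_one_shiftLeft (n : Nat) : ((1 : Int) <<< n) = 2 ^ n := by
  rw [Int.shiftLeft_eq]; norm_num

-- x & (2^n - 1) = x for 0 ≤ x < 2^n
theorem band_mask_self (x : Int) (n : Nat) (h0 : 0 ≤ x) (h1 : x < 2 ^ n) :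
    PySem.Int.band x ((2 : Int) ^ n - 1) = x := by
  have hpow : ((2 ^ n : Nat) : Int) = (2 : Int) ^ n := by push_cast; ring
  have h1n : 0 < 2 ^ n := Nat.two_pow_pos n
  have hm : (0 : Int) ≤ (2 : Int) ^ n - 1 := by rw [← hpow]; omega
  rw [PySem.Int.band_of_nonneg h0 hm]
  have hxt : (x.toNat : Int) = x := Int.toNat_of_nonneg h0
  have hmt : ((2 : Int) ^ n - 1).toNat = 2 ^ n - 1 := by rw [← hpow]; omega
  have hxlt : x.toNat < 2 ^ n := by rw [← hpow] at h1; omega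
  rw [hmt, Nat.and_two_pow_sub_one_eq_mod, Nat.mod_eq_of_lt hxlt]
  exact hxt

-- ===== VERDICT (by name: the statement is the Claim_ definition above) =====
theorem twos_complement_to_sign_magnitude_spec : Claim_equal_twos_complement_to_sign_magnitude := by
  intro binary _ hpre
  obtain ⟨hne, hbits⟩ := hpre
  unfold Spec_twos_complement_to_sign_magnitude
  cases binary with
  | nil => exact absurd rfl hne
  | cons b0 rest =>
      have hsign : PySem.List.pyGetD (b0 :: rest) 0 0 = b0 :=
        PySem.List.pyGetD_zero_cons b0 rest 0
      unfold twos_complement_to_sign_magnitude twos_complement_to_sign_magnitude_alt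
      simp only [hsign]
      by_cases hb0 : b0 = 0
      · simp [hb0]
      · have hb1 : b0 = 1 := by
          rcases hbits b0 (List.mem_cons_self) with h | h
          · exact absurd h hb0
          · exact h
        simp only [if_neg hb0]
        have hinvbits : ∀ b ∈ (b0 :: rest).map (fun bit => 1 - bit), b = 0 ∨ b = 1 := by
          intro b hb
          simp only [List.mem_map] at hb
          obtain ⟨x, hx, hxb⟩ := hb
          rcases hbits x hx with h | h <;> subst h <;> omega
        have hA := pyIntBase2?_joinBits ((b0 :: rest).map (fun bit => 1 - bit)) (by simp) hinvbits
        have hB := pyIntBase2?_joinBits (b0 :: rest) (by simp) hbits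
        rw [hA, hB]
        simp only [Option.getD_some, List.length_cons, int_one_shiftLeft]
        set V := (b0 :: rest).foldl (fun x b => 2 * x + b) 0 with hV
        set W := ((b0 :: rest).map (fun bit => 1 - bit)).foldl (fun x b => 2 * x + b) 0 with hW
        have hsum : V + W = 2 ^ (rest.length + 1) - 1 := by
          have h := foldl_add_inv (b0 :: rest) 0 0
          simp only [List.length_cons] at h
          rw [← hV, ← hW] at h
          omega
        have hVlow : 1 ≤ V := by
          have hVr : V = rest.foldl (fun x b => 2 * x + b) 1 := by
            rw [hV, hb1]
            simp only [List.foldl_cons]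
            norm_num
          rw [hVr]
          exact foldl_bits_lower rest 1 (fun x hx => hbits x (List.mem_cons_of_mem _ hx)) (by omega)
        have hVhigh : V ≤ 2 ^ (rest.length + 1) - 1 := by
          have h := foldl_bits_upper (b0 :: rest) 0 hbits
          simp only [List.length_cons] at h
          rw [← hV] at h
          omega
        have hW1 : W + 1 = 2 ^ (rest.length + 1) - V := by omega
        rw [hW1, band_mask_self _ _ (by omega) (by omega)]

-- (end)
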